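-- pv_equiv track=rewrite | github.com/mrinxx/Pycharm | LISTAS Y TUPLAS/4.py | elimina_duplicados
-- ===== SOURCE A (Python) =====
-- def elimina_duplicados(lista2): #define la funcion
--     lista2.sort() #primero la ordena
--     lista3=[] #lista para mostrar
--     listae=[] #lista con los eliminados
--     for i in lista2: #para cada elemento que este en la lista
--         if i not in lista3: #si no esta en la lista que se va a mostrar
--             lista3.append(i) #lo añade
--         else: #si si que esta en la lista
--             listae.append(i) #lo añade a la lista de los eliminados
--
--     return lista3,listae #la funcion devolvera la lista y la de los eliminados
-- ===== SOURCE B (Python) =====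
-- def elimina_duplicados(lista2):
--     lista2.sort()
--     uniques = lista2[:1] + [x for p, x in zip(lista2, lista2[1:]) if p != x]
--     removed = [x for p, x in zip(lista2, lista2[1:]) if p == x]
--     return uniques, removed
-- ===== Notes on version B (the rewrite author's own statement) =====
-- stated objective: faster
-- what changed: Replaces A's single accumulator loop with its 'i not in lista3' membership scan by two staged zip-adjacent-pair comprehensions over the sorted list (head + elements differing from their predecessor = uniques; elements equal to their predecessor = removed).
import Mathlib
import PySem

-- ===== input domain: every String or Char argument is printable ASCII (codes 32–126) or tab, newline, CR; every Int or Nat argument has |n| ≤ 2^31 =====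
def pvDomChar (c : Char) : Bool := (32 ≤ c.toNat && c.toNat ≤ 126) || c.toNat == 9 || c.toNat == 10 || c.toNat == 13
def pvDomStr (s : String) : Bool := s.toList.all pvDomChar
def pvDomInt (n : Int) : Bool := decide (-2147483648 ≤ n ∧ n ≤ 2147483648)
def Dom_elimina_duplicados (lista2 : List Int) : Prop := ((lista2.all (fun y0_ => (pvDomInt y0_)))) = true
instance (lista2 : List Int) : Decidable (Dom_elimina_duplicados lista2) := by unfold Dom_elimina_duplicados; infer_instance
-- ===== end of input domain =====

-- B replaces A's quadratic membership scan of the output list with two staged zip-adjacent-pair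
-- comprehensions over the sorted list (equivalence is about the return value; both sort the argument in place).


-- ===== PORT A =====
-- the for-loop of A: state (lista3, listae); 'i not in lista3' is a scan of the output list
def edLoopA : List Int → List Int → List Int → List Int × List Int
  | [], u, r => (u, r)
  | x :: xs, u, r => if ¬ (x ∈ u) then edLoopA xs (u ++ [x]) r else edLoopA xs u (r ++ [x])

def elimina_duplicados (lista2 : List Int) : List Int × List Int :=
  edLoopA (PySem.List.sorted lista2 (fun x => x) false) [] []

-- ===== PORT B =====
-- B: lista2[:1] and lista2[1:] are slices; zip pairs each element with its predecessor;
-- each comprehension is a map of Prod.snd over a filter of those pairs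
def elimina_duplicados_alt (lista2 : List Int) : List Int × List Int :=
  let s := PySem.List.sorted lista2 (fun x => x) false
  let pairs := s.zip (PySem.List.slice s (some 1) none)
  (PySem.List.slice s none (some 1) ++ (pairs.filter (fun q => q.1 != q.2)).map Prod.snd,
   (pairs.filter (fun q => q.1 == q.2)).map Prod.snd)

-- ===== PRECONDITION & SPEC =====
def Spec_elimina_duplicados (lista2 : List Int) (out : List Int × List Int) : Prop := out = elimina_duplicados_alt lista2
instance (lista2 : List Int) (out : List Int × List Int) : Decidable (Spec_elimina_duplicados lista2 out) := by unfold Spec_elimina_duplicados; infer_instance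

-- ===== CLAIM (what is proved, stated in full; the proofs are below) =====
def Claim_equal_elimina_duplicados : Prop := ∀ (lista2 : List Int), Dom_elimina_duplicados lista2 → Spec_elimina_duplicados lista2 (elimina_duplicados lista2)

-- ===== LEMMAS AND PROOFS =====

-- each element of xs paired with its predecessor (the element before it, or 'prev' for the head)
def pvF : Option Int → List Int → List (Option Int × Int)
  | _, [] => []
  | p, x :: xs => (p, x) :: pvF (some x) xs

def pvFU (prev : Option Int) (xs : List Int) : List Int :=
  ((pvF prev xs).filter (fun q => q.1 != some q.2)).map Prod.snd

def pvFR (prev : Option Int) (xs : List Int) : List Int :=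
  ((pvF prev xs).filter (fun q => q.1 == some q.2)).map Prod.snd

-- A's loop on a sorted suffix: 'x ∈ u' coincides with 'x = prev', so the loop computes the
-- predecessor-pair filters, provided prev is the maximum of u and u is ≤ the suffix.
lemma edLoopA_eq_pvF (xs : List Int) : ∀ (u r : List Int) (prev : Option Int),
    xs.Pairwise (· ≤ ·) →
    (∀ a ∈ u, ∀ b ∈ xs, a ≤ b) →
    (prev = none → u = []) →
    (∀ p, prev = some p → p ∈ u ∧ ∀ a ∈ u, a ≤ p) →
    edLoopA xs u r = (u ++ pvFU prev xs, r ++ pvFR prev xs) := by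
  induction xs with
  | nil => intro u r prev _ _ _ _; simp [edLoopA, pvFU, pvFR, pvF]
  | cons x xs ih =>
    intro u r prev hpw h2 h3 h4
    rw [List.pairwise_cons] at hpw
    obtain ⟨hx, hpw'⟩ := hpw
    have h2' : ∀ a ∈ u, ∀ b ∈ xs, a ≤ b := fun a ha b hb => h2 a ha b (List.mem_cons_of_mem _ hb)
    cases prev with
    | none =>
      have hu : u = [] := h3 rfl
      subst hu
      simp only [edLoopA]
      rw [if_pos (by simp)]
      rw [List.nil_append, ih [x] r (some x) hpw'
        (by intro a ha b hb; simp at ha; subst ha; exact hx b hb)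
        (by intro h; cases h)
        (by intro p hp; cases hp; exact ⟨by simp, by intro a ha; simp at ha; omega⟩)]
      simp [pvFU, pvFR, pvF]
    | some p =>
      obtain ⟨hpu, hmax⟩ := h4 p rfl
      by_cases hpx : p = x
      · have hmem : x ∈ u := hpx ▸ hpu
        simp only [edLoopA]
        rw [if_neg (by simp [hmem])]
        rw [ih u (r ++ [x]) (some p) hpw' h2' (by intro h; cases h)
          (by intro q hq; cases hq; exact ⟨hpu, hmax⟩)]
        subst hpx
        simp [pvFU, pvFR, pvF]
      · have hmem : x ∉ u := by
          intro hxin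
          have hxp : x ≤ p := hmax x hxin
          have hpx' : p ≤ x := h2 p hpu x (List.mem_cons_self)
          exact hpx (le_antisymm hpx' hxp)
        simp only [edLoopA]
        rw [if_pos hmem]
        rw [ih (u ++ [x]) r (some x) hpw'
          (by intro a ha b hb
              rcases List.mem_append.mp ha with h | h
              · exact h2' a h b hb
              · simp at h; subst h; exact hx b hb)
          (by intro h; cases h)
          (by intro q hq; cases hq
              refine ⟨List.mem_append.mpr (Or.inr (by simp)), ?_⟩
              intro a ha
              rcases List.mem_append.mp ha with h | h
              · exact h2 a h x (List.mem_cons_self)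
              · simp at h; omega)]
        have hne : ((some p : Option Int) != some x) = true := by simp [hpx]
        simp [pvFU, pvFR, pvF, hne, hpx]

-- on pairs with a known previous element, the Option comparison is the plain zip comparison
lemma pvF_filter_ne (l : List Int) : ∀ a : Int,
    ((pvF (some a) l).filter (fun q => q.1 != some q.2)).map Prod.snd
      = (((a :: l).zip l).filter (fun q => q.1 != q.2)).map Prod.snd := by
  induction l with
  | nil => intro a; rfl
  | cons x xs ih =>
    intro a
    simp only [pvF, List.zip_cons_cons, List.filter_cons,
      show ((some a : Option Int) != some x) = (a != x) from rfl]
    by_cases h : (a != x) = true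
    · simp [h, ih x]
    · simp [h, ih x]

lemma pvF_filter_eq (l : List Int) : ∀ a : Int,
    ((pvF (some a) l).filter (fun q => q.1 == some q.2)).map Prod.snd
      = (((a :: l).zip l).filter (fun q => q.1 == q.2)).map Prod.snd := by
  induction l with
  | nil => intro a; rfl
  | cons x xs ih =>
    intro a
    simp only [pvF, List.zip_cons_cons, List.filter_cons,
      show ((some a : Option Int) == some x) = (a == x) from rfl]
    by_cases h : (a == x) = true
    · simp [h, ih x]
    · simp [h, ih x]

-- the pvF filters with prev = none are B's slice/zip/filter comprehensions
lemma pvFU_eq_zip (s : List Int) :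
    pvFU none s = s.take 1 ++ ((s.zip s.tail).filter (fun q => q.1 != q.2)).map Prod.snd := by
  cases s with
  | nil => rfl
  | cons x xs =>
    simp only [pvFU, pvF, List.filter_cons,
      show ((none : Option Int) != some x) = true from rfl, if_true, List.map_cons,
      List.take, List.tail_cons, List.cons_append, List.nil_append]
    rw [pvF_filter_ne xs x]

lemma pvFR_eq_zip (s : List Int) :
    pvFR none s = ((s.zip s.tail).filter (fun q => q.1 == q.2)).map Prod.snd := by
  cases s with
  | nil => rfl
  | cons x xs =>
    simp only [pvFR, pvF, List.filter_cons,
      show ((none : Option Int) == some x) = false from rfl, List.tail_cons]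
    rw [if_neg (by simp), pvF_filter_eq xs x]

-- ===== VERDICT (by name: the statement is the Claim_ definition above) =====
theorem elimina_duplicados_spec : Claim_equal_elimina_duplicados := by
  intro lista2 _
  show _ = _
  unfold elimina_duplicados elimina_duplicados_alt
  rw [edLoopA_eq_pvF _ [] [] none (PySem.List.sorted_pairwise lista2 (fun x => x))
    (by simp) (fun _ => rfl) (by intro p hp; cases hp)]
  simp only []
  rw [PySem.List.slice_from_one, PySem.List.slice_to _ (by norm_num : (0:Int) ≤ 1)]
  simp [pvFU_eq_zip, pvFR_eq_zip]
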